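-- pv_equiv track=rewrite | github.com/hafidzyami/CivilConstructionApp | ocr-service/modules/surya_utils.py | group_by_region
-- ===== SOURCE A (Python) =====
-- def group_by_region(ocr_results):
--     """Group text lines by region type"""
--     grouped = {}
--     for line in ocr_results.get('text_lines', []):
--         region_type = line.get('region_type', 'Unknown')
--         if region_type not in grouped:
--             grouped[region_type] = []
--         grouped[region_type].append(line.get('text', ''))
--     return grouped
-- ===== SOURCE B (Python) =====
-- def group_by_region(ocr_results):
--     """Group text lines by region type"""
--     lines = ocr_results.get('text_lines', [])
--     regions = list(dict.fromkeys(l.get('region_type', 'Unknown') for l in lines))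
--     return {r: [l.get('text', '') for l in lines if l.get('region_type', 'Unknown') == r]
--             for r in regions}
-- ===== Notes on version B (the rewrite author's own statement) =====
-- stated objective: alternative
-- what changed: B replaces A's single-pass incremental dict accumulation with a two-pass scheme: first compute the ordered set of distinct region types (dict.fromkeys), then build each group by filtering the lines once per region in a dict comprehension.
import Mathlib
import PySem

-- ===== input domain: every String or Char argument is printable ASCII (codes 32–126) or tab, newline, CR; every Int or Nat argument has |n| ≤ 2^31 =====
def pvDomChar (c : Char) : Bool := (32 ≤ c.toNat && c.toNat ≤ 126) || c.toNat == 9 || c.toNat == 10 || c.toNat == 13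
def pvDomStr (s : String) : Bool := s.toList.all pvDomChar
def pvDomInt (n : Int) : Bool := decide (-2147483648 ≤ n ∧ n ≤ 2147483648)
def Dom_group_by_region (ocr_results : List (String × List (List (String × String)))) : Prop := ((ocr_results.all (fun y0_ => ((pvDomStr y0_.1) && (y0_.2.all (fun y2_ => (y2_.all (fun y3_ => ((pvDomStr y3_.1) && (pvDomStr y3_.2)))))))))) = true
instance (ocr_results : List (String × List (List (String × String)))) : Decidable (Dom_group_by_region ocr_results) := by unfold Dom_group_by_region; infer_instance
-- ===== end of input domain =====

-- B: two-pass alternative — ordered distinct region types, then one filter pass per region,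
-- instead of A's single-pass incremental dict accumulation; same return value, no speed claim.

-- shared helper: Python dict.get(k, dflt) on an association list (first match)
def pyGetSD {α : Type} (d : List (String × α)) (k : String) (dflt : α) : α :=
  (List.lookup k d).getD dflt

-- ===== PORT A =====
def group_by_region (ocr_results : List (String × List (List (String × String)))) : List (String × List String) :=
  ((pyGetSD ocr_results "text_lines" []).foldl
    (fun grouped line =>
      let region_type := pyGetSD line "region_type" "Unknown"
      let grouped := if grouped.contains region_type then grouped
                     else grouped.insert region_type ([] : List String)
      grouped.modify region_type [] (fun ts => ts ++ [pyGetSD line "text" ""]))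
    PySem.Dict.empty).items

-- ===== PORT B =====
def group_by_region_alt (ocr_results : List (String × List (List (String × String)))) : List (String × List String) :=
  let lines := pyGetSD ocr_results "text_lines" []
  let regions := PySem.List.dedup (lines.map (fun l => pyGetSD l "region_type" "Unknown"))
  regions.map (fun r =>
    (r, (lines.filter (fun l => pyGetSD l "region_type" "Unknown" == r)).map
          (fun l => pyGetSD l "text" "")))

-- ===== PRECONDITION & SPEC =====
def Spec_group_by_region (ocr_results : List (String × List (List (String × String)))) (out : List (String × List String)) : Prop := out = group_by_region_alt ocr_results
instance (ocr_results : List (String × List (List (String × String)))) (out : List (String × List String)) : Decidable (Spec_group_by_region ocr_results out) := by unfold Spec_group_by_region; infer_instance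

-- ===== CLAIM (what is proved, stated in full; the proofs are below) =====
def Claim_equal_group_by_region : Prop := ∀ (ocr_results : List (String × List (List (String × String)))), Dom_group_by_region ocr_results → Spec_group_by_region ocr_results (group_by_region ocr_results)

-- ===== LEMMAS AND PROOFS =====

-- ===== VERDICT (by name: the statement is the Claim_ definition above) =====
-- A's loop body (conditional fresh insert, then append) is exactly Dict.modify with default []
theorem stepA_eq_modify (d : PySem.Dict String (List String)) (k t : String) :
    (if d.contains k then d else d.insert k ([] : List String)).modify k [] (fun ts => ts ++ [t])
      = d.modify k [] (fun ts => ts ++ [t]) := by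
  by_cases h : d.contains k
  · simp [h]
  · simp only [h, if_neg, Bool.not_eq_true]
    simp [PySem.Dict.modify, PySem.Dict.insert_insert_self,
      PySem.Dict.getD_insert_self,
      PySem.Dict.getD_of_not_contains d ([] : List String) (by simpa using h)]

theorem group_by_region_spec : Claim_equal_group_by_region := by
  intro ocr _
  unfold Spec_group_by_region group_by_region group_by_region_alt
  set lines := pyGetSD ocr "text_lines" [] with hlines
  set key : List (String × String) → String := fun l => pyGetSD l "region_type" "Unknown" with hkey
  set txt : List (String × String) → String := fun l => pyGetSD l "text" "" with htxt
  -- A's fold = the plain modify-fold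
  have hfold :
      lines.foldl
        (fun grouped line =>
          let region_type := key line
          let grouped := if grouped.contains region_type then grouped
                         else grouped.insert region_type ([] : List String)
          grouped.modify region_type [] (fun ts => ts ++ [txt line]))
        PySem.Dict.empty
      = (lines.map (fun l => (key l, txt l))).foldl
          (fun d p => d.modify p.1 [] (fun ts => ts ++ [p.2])) PySem.Dict.empty := by
    rw [List.foldl_map]
    induction lines using List.reverseRecOn with
    | nil => rfl
    | append_singleton xs x ih =>
      simp only [List.foldl_append, List.foldl_cons, List.foldl_nil, ih]
      exact stepA_eq_modify _ (key x) (txt x)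
  rw [hfold]
  set D := (lines.map (fun l => (key l, txt l))).foldl
      (fun d p => d.modify p.1 [] (fun ts => ts ++ [p.2])) PySem.Dict.empty with hD
  have hnodup : D.keys.Nodup := by
    rw [hD]
    exact PySem.Dict.nodup_keys_foldl_modify_key _ _ _ _ _ (by simp)
  have hkeys : D.keys = PySem.List.dedup (lines.map key) := by
    rw [hD, PySem.Dict.keys_foldl_modify_key]
    simp only [List.map_map]
    rw [show (Prod.fst ∘ fun l => (key l, txt l)) = key from rfl]
    rw [show (PySem.Dict.empty : PySem.Dict String (List String)).keys = [] from rfl]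
    rw [PySem.Set.update_nil_left]
    rfl
  have hgetD : ∀ r, D.getD r [] =
      (lines.filter (fun l => key l == r)).map txt := by
    intro r
    rw [hD, PySem.Dict.getD_foldl_modify_append]
    rw [show (PySem.Dict.empty : PySem.Dict String (List String)).getD r [] = [] from rfl]
    rw [List.filter_map, List.map_map]
    rfl
  rw [PySem.Dict.items_eq_map_keys D hnodup [], hkeys]
  exact List.map_congr_left (fun r _ => by rw [hgetD r])
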